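-- pv_equiv track=rewrite | github.com/xw2781/ADAS-Actuarial-Data-Analysis-System | frontend/app_server/helpers.py | _normalize_reserving_hidden_path_list
-- ===== SOURCE A (Python) =====
-- from typing import Any, Dict, List, Optional, Tuple
--
-- def _norm_tree_path(value: Any) -> str:
--     s = str(value or "").strip().replace("/", "\\")
--     if not s:
--         return ""
--     parts = [p.strip() for p in s.split("\\") if p and p.strip()]
--     return "\\".join(parts)
--
-- def _normalize_reserving_hidden_path_list(raw_paths: Any) -> List[str]:
--     out: List[str] = []
--     seen: set[str] = set()
--     if not isinstance(raw_paths, list):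
--         return out
--     for raw in raw_paths:
--         path = _norm_tree_path(raw)
--         if not path:
--             continue
--         key = path.lower()
--         if key in seen:
--             continue
--         seen.add(key)
--         out.append(path)
--     out.sort(key=lambda x: x.lower())
--     return out
-- ===== SOURCE B (Python) =====
-- from typing import Any, List
--
-- def _norm_tree_path(value: Any) -> str:
--     s = str(value or "").strip().replace("/", "\\")
--     if not s:
--         return ""
--     parts = [p.strip() for p in s.split("\\") if p and p.strip()]
--     return "\\".join(parts)
--
-- def _normalize_reserving_hidden_path_list(raw_paths: Any) -> List[str]:
--     if not isinstance(raw_paths, list):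
--         return []
--     items = [p for p in (_norm_tree_path(r) for r in raw_paths) if p]
--     items.sort(key=str.lower)
--     result: List[str] = []
--     last = None
--     for item in items:
--         key = item.lower()
--         if key != last:
--             result.append(item)
--             last = key
--     return result
-- ===== Notes on version B (the rewrite author's own statement) =====
-- stated objective: alternative
-- what changed: A dedups with a running seen-set before sorting; B drops the seen-set entirely: it normalizes and filters, stably sorts by lowercase, and dedups in one adjacent-comparison pass over the sorted list (stability makes the first-seen casing survive each equal-lowercase run).
import Mathlib
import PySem

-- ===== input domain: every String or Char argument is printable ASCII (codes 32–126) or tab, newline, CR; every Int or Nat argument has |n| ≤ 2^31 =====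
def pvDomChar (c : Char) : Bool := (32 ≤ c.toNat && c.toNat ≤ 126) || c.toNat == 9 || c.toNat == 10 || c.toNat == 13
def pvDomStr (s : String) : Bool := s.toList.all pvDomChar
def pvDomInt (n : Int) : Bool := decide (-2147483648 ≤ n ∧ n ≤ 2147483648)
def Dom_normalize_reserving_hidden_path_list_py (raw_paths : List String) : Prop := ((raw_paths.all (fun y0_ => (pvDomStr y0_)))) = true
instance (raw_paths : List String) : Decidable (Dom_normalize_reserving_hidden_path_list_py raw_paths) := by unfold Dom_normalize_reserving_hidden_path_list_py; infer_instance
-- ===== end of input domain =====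

-- B replaces A's seen-set-dedup-then-sort by sort-then-one-adjacent-pass dedup (objective: alternative decomposition; return value only, A sorts a local list in place).

-- shared helper _norm_tree_path (identical in both Python sources)
-- str(value or "") on a string is the string itself; split("\\") with a non-empty literal separator never returns none, so .getD [] is unreachable
def pvNormTreePath (value : String) : String :=
  let s := PySem.Str.replace (PySem.Str.strip value) "/" "\\"
  if s = "" then ""
  else
    let parts := (((PySem.Str.split? s "\\").getD []).filter
      (fun p => ¬ (p = "") ∧ ¬ (PySem.Str.strip p = ""))).map PySem.Str.strip
    PySem.Str.join "\\" parts

-- ===== PORT A =====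
def normalize_reserving_hidden_path_list_py (raw_paths : List String) : List String :=
  let st := raw_paths.foldl
    (fun (acc : List String × PySem.Set String) raw =>
      let path := pvNormTreePath raw
      if path = "" then acc
      else
        let key := PySem.Str.lower path
        if key ∈ acc.2 then acc
        else (acc.1 ++ [path], PySem.Set.add acc.2 key))
    ([], PySem.Set.empty)
  PySem.List.sorted st.1 (fun x => PySem.Str.lower x) false

-- ===== PORT B =====
def normalize_reserving_hidden_path_list_py_alt (raw_paths : List String) : List String :=
  let items := PySem.List.sorted ((raw_paths.map pvNormTreePath).filter (fun p => ¬ (p = "")))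
    (fun x => PySem.Str.lower x) false
  (items.foldl
    (fun (acc : List String × Option String) item =>
      let key := PySem.Str.lower item
      if some key = acc.2 then acc
      else (acc.1 ++ [item], some key))
    ([], none)).1

-- ===== PRECONDITION & SPEC =====
def Spec_normalize_reserving_hidden_path_list_py (raw_paths : List String) (out : List String) : Prop := out = normalize_reserving_hidden_path_list_py_alt raw_paths
instance (raw_paths : List String) (out : List String) : Decidable (Spec_normalize_reserving_hidden_path_list_py raw_paths out) := by unfold Spec_normalize_reserving_hidden_path_list_py; infer_instance

-- ===== CLAIM (what is proved, stated in full; the proofs are below) =====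
def Claim_equal_normalize_reserving_hidden_path_list_py : Prop := ∀ (raw_paths : List String), Dom_normalize_reserving_hidden_path_list_py raw_paths → Spec_normalize_reserving_hidden_path_list_py raw_paths (normalize_reserving_hidden_path_list_py raw_paths)

-- ===== LEMMAS AND PROOFS =====

-- abbreviations used only by the proofs
def pvK (x : String) : String := PySem.Str.lower x
def pvIns (p : String) (l : List String) : List String :=
  PySem.List.insertBy (fun a b => decide (pvK a < pvK b)) p l

-- B's dedup loop written as structural recursion on the list (last kept lowercase key as state)
def pvGo : Option String → List String → List String
  | _, [] => []
  | last, y :: t =>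
      if some (pvK y) = last then pvGo last t
      else y :: pvGo (some (pvK y)) t

theorem pvIns_nil (p : String) : pvIns p [] = [p] := rfl

theorem pvIns_cons_lt (p y : String) (h : pvK p < pvK y) (t : List String) :
    pvIns p (y :: t) = p :: y :: t := by
  simp [pvIns, PySem.List.insertBy, h]

theorem pvIns_cons_ge (p y : String) (h : ¬ pvK p < pvK y) (t : List String) :
    pvIns p (y :: t) = y :: pvIns p t := by
  simp [pvIns, PySem.List.insertBy, h]

theorem pvFoldl_go (items : List String) : ∀ (acc0 : List String) (last : Option String),
    (items.foldl
      (fun (acc : List String × Option String) item =>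
        let key := PySem.Str.lower item
        if some key = acc.2 then acc
        else (acc.1 ++ [item], some key))
      (acc0, last)).1 = acc0 ++ pvGo last items := by
  induction items with
  | nil => intro acc0 last; simp [pvGo]
  | cons y t ih =>
    intro acc0 last
    by_cases h : (some (PySem.Str.lower y) : Option String) = last
    · simp [List.foldl_cons, h, pvGo, pvK, ih]
    · simp [List.foldl_cons, h, pvGo, pvK, ih]

theorem pvGo_skip (p : String) (last : Option String) (hl : last = some (pvK p))
    (t : List String) : pvGo last (p :: t) = pvGo last t := by
  simp [pvGo, hl]

-- inserting a duplicate-keyed element is invisible to the dedup pass (on a key-sorted list)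
theorem pvGo_ins_dup (p : String) :
    ∀ (l : List String) (last : Option String),
      l.Pairwise (fun a b => pvK a ≤ pvK b) → pvK p ∈ l.map pvK →
      pvGo last (pvIns p l) = pvGo last l := by
  intro l
  induction l with
  | nil => intro last _ hmem; simp at hmem
  | cons y t ih =>
    intro last hpw hmem
    have hpwt := (List.pairwise_cons.mp hpw).2
    have hyall := (List.pairwise_cons.mp hpw).1
    by_cases hlt : pvK p < pvK y
    · exfalso
      rcases List.mem_map.mp hmem with ⟨z, hz, hkz⟩
      rcases List.mem_cons.mp hz with rfl | hzt
      · exact absurd hkz (ne_of_gt hlt)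
      · exact absurd hkz (ne_of_gt (lt_of_lt_of_le hlt (hyall z hzt)))
    · rw [pvIns_cons_ge p y hlt]
      by_cases hmt : pvK p ∈ t.map pvK
      · by_cases hy : (some (pvK y) : Option String) = last
        · simp only [pvGo, if_pos hy]; exact ih last hpwt hmt
        · simp only [pvGo, if_neg hy]; rw [ih _ hpwt hmt]
      · have hpy : pvK p = pvK y := by
          rcases List.mem_map.mp hmem with ⟨z, hz, hkz⟩
          rcases List.mem_cons.mp hz with rfl | hzt
          · exact hkz.symm
          · exact absurd (List.mem_map.mpr ⟨z, hzt, hkz⟩) hmt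
        have htgt : ∀ z ∈ t, pvK p < pvK z := by
          intro z hz
          rcases lt_or_eq_of_le (hpy ▸ hyall z hz) with h | h
          · exact h
          · exact absurd (List.mem_map.mpr ⟨z, hz, h.symm⟩) hmt
        have hinspt : pvIns p t = p :: t := by
          cases t with
          | nil => rfl
          | cons z t' => exact pvIns_cons_lt p z (htgt z (by simp)) t'
        by_cases hy : (some (pvK y) : Option String) = last
        · simp only [pvGo, if_pos hy]
          rw [hinspt, pvGo_skip p last (by rw [← hy, hpy])]
        · simp only [pvGo, if_neg hy]
          rw [hinspt, pvGo_skip p (some (pvK y)) (by rw [hpy])]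

-- inserting a fresh-keyed element commutes with the dedup pass (on a key-sorted list)
theorem pvGo_ins_new (p : String) :
    ∀ (l : List String) (last : Option String),
      l.Pairwise (fun a b => pvK a ≤ pvK b) → pvK p ∉ l.map pvK →
      (last = none ∨ ∃ m, last = some m ∧ m < pvK p) →
      pvGo last (pvIns p l) = pvIns p (pvGo last l) := by
  intro l
  induction l with
  | nil =>
    intro last _ _ hlast
    have hne : (some (pvK p) : Option String) ≠ last := by
      rcases hlast with rfl | ⟨m, rfl, hm⟩
      · simp
      · intro h; rw [Option.some.injEq] at h; rw [← h] at hm; exact lt_irrefl _ hm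
    rw [pvIns_nil]
    simp [pvGo, hne, pvIns_nil]
  | cons y t ih =>
    intro last hpw hmem hlast
    have hpwt := (List.pairwise_cons.mp hpw).2
    have hpy : pvK p ≠ pvK y := fun h => hmem (List.mem_map.mpr ⟨y, by simp, h.symm⟩)
    have hmt : pvK p ∉ t.map pvK := fun h => by
      rcases List.mem_map.mp h with ⟨z, hz, hkz⟩
      exact hmem (List.mem_map.mpr ⟨z, by simp [hz], hkz⟩)
    by_cases hlt : pvK p < pvK y
    · have hpne : (some (pvK p) : Option String) ≠ last := by
        rcases hlast with rfl | ⟨m, rfl, hm⟩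
        · simp
        · intro h; rw [Option.some.injEq] at h; rw [← h] at hm; exact lt_irrefl _ hm
      have hyne : (some (pvK y) : Option String) ≠ last := by
        rcases hlast with rfl | ⟨m, rfl, hm⟩
        · simp
        · intro h; rw [Option.some.injEq] at h
          rw [← h] at hm
          exact lt_irrefl _ (lt_trans hm hlt)
      have hyp : (some (pvK y) : Option String) ≠ some (pvK p) := by
        intro h; rw [Option.some.injEq] at h; exact hpy h.symm
      rw [pvIns_cons_lt p y hlt]
      simp only [pvGo, if_neg hpne, if_neg hyp, if_neg hyne]
      rw [pvIns_cons_lt p y hlt]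
    · have hylt : pvK y < pvK p := lt_of_le_of_ne (le_of_not_gt hlt) (fun h => hpy h.symm)
      rw [pvIns_cons_ge p y hlt]
      by_cases hy : (some (pvK y) : Option String) = last
      · simp only [pvGo, if_pos hy]
        exact ih last hpwt hmt hlast
      · simp only [pvGo, if_neg hy]
        rw [ih (some (pvK y)) hpwt hmt (Or.inr ⟨pvK y, rfl, hylt⟩)]
        rw [pvIns_cons_ge p y hlt]

-- the normalized, empty-dropped list B works on
def pvFilt (xs : List String) : List String :=
  (xs.map pvNormTreePath).filter (fun p => ¬ (p = ""))

-- A's loop state after a prefix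
def pvF (xs : List String) : List String × PySem.Set String :=
  xs.foldl
    (fun (acc : List String × PySem.Set String) raw =>
      let path := pvNormTreePath raw
      if path = "" then acc
      else
        let key := PySem.Str.lower path
        if key ∈ acc.2 then acc
        else (acc.1 ++ [path], PySem.Set.add acc.2 key))
    ([], PySem.Set.empty)

theorem pvMain (xs : List String) :
    (∀ s, s ∈ (pvF xs).2 ↔ s ∈ (pvFilt xs).map pvK) ∧
    PySem.List.sorted (pvF xs).1 pvK false
      = pvGo none (PySem.List.sorted (pvFilt xs) pvK false) := by
  induction xs using List.reverseRecOn with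
  | nil =>
    constructor
    · intro s; simp [pvF, pvFilt, PySem.Set.empty]
    · simp [pvF, pvFilt, PySem.List.sorted_eq_foldl_insertBy, pvGo]
  | append_singleton xs x ih =>
    set p := pvNormTreePath x with hp
    have hF : pvF (xs ++ [x]) =
        (if p = "" then pvF xs
         else if PySem.Str.lower p ∈ (pvF xs).2 then pvF xs
         else ((pvF xs).1 ++ [p], PySem.Set.add (pvF xs).2 (PySem.Str.lower p))) := by
      simp [pvF, List.foldl_append, hp]
    by_cases hempty : p = ""
    · have hfilt : pvFilt (xs ++ [x]) = pvFilt xs := by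
        simp [pvFilt, List.filter_append, List.filter, ← hp, hempty]
      rw [hF, if_pos hempty, hfilt]
      exact ih
    · have hfilt : pvFilt (xs ++ [x]) = pvFilt xs ++ [p] := by
        simp [pvFilt, List.filter_append, List.filter, ← hp, hempty]
      have hsorta : PySem.List.sorted (pvFilt (xs ++ [x])) pvK false
          = pvIns p (PySem.List.sorted (pvFilt xs) pvK false) := by
        rw [hfilt, PySem.List.sorted_eq_foldl_insertBy, List.foldl_append,
          ← PySem.List.sorted_eq_foldl_insertBy]
        rfl
      have hmemtrans : pvK p ∈ (PySem.List.sorted (pvFilt xs) pvK false).map pvK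
          ↔ pvK p ∈ (pvFilt xs).map pvK :=
        ((PySem.List.sorted_perm (pvFilt xs) pvK false).map pvK).mem_iff
      have hpw := PySem.List.sorted_pairwise (pvFilt xs) pvK
      rw [hF, if_neg hempty]
      by_cases hseen : PySem.Str.lower p ∈ (pvF xs).2
      · have hkmem : pvK p ∈ (pvFilt xs).map pvK := (ih.1 _).mp hseen
        rw [if_pos hseen]
        refine ⟨?_, ?_⟩
        · intro s
          rw [ih.1 s, hfilt]
          simp only [List.map_append, List.mem_append, List.map_cons, List.map_nil,
            List.mem_singleton]
          constructor
          · exact Or.inl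
          · rintro (h | h)
            · exact h
            · rw [h]; exact hkmem
        · rw [hsorta, pvGo_ins_dup p _ none hpw (hmemtrans.mpr hkmem)]
          exact ih.2
      · have hkmem : pvK p ∉ (pvFilt xs).map pvK := fun h => hseen ((ih.1 _).mpr h)
        rw [if_neg hseen]
        refine ⟨?_, ?_⟩
        · intro s
          rw [PySem.Set.mem_add, ih.1 s, hfilt]
          simp [List.mem_append, pvK]
        · rw [hsorta, pvGo_ins_new p _ none hpw (fun h => hkmem (hmemtrans.mp h)) (Or.inl rfl),
            ← ih.2, PySem.List.sorted_eq_foldl_insertBy ((pvF xs).1 ++ [p]),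
            List.foldl_append, ← PySem.List.sorted_eq_foldl_insertBy]
          rfl

-- ===== VERDICT (by name: the statement is the Claim_ definition above) =====
theorem normalize_reserving_hidden_path_list_py_spec : Claim_equal_normalize_reserving_hidden_path_list_py := by
  intro raw_paths _
  unfold Spec_normalize_reserving_hidden_path_list_py
  show normalize_reserving_hidden_path_list_py raw_paths
      = normalize_reserving_hidden_path_list_py_alt raw_paths
  unfold normalize_reserving_hidden_path_list_py normalize_reserving_hidden_path_list_py_alt
  rw [pvFoldl_go]
  rw [List.nil_append]
  exact (pvMain raw_paths).2
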